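-- pv_equiv track=rewrite | github.com/my-temporary-name/gfg | dynamic programming/video/26_allocate_min_page.py | minpages
-- ===== SOURCE A (Python) =====
-- def minpages(arr,n,k) :
--     if (k == 1) : # if only one student, then he has to read all the books
--         return sum(arr[0:n])
--     if (n == 1) : # if only one book, then he has to read that book
--         return arr[0]
--     res = float('inf')
--     for i in range(1,n) :
--         res = min(res,max(minpages(arr,i,k-1),sum(arr[i:n]))) # either assign the current book to the current student or start a new student
--     return res
-- ===== SOURCE B (Python) =====
-- def minpages(arr, n, k):
--     if k == 1:
--         return sum(arr[0:n])
--     if n == 1: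
--         return arr[0]
--     pref = [sum(arr[:m]) for m in range(n + 1)]  # prefix page sums, slice-clamped like A's sums
--     dp = pref[1:]                      # dp[m-1]: best for the first m books with 1 student
--     for _ in range(3, min(k, n) + 1):  # rows for 2..min(k,n)-1 students (more students than books never helps)
--         dp = [dp[0]] + [
--             min(max(dp[i - 1], pref[m] - pref[i]) for i in range(1, m))
--             for m in range(2, n + 1)
--         ]
--     # final student count: only the entry for all n books is needed
--     return min(max(dp[i - 1], pref[n] - pref[i]) for i in range(1, n))
-- ===== Notes on version B (the rewrite author's own statement) =====
-- stated objective: alternative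
-- what changed: A's exponential top-down recursion over all split points is replaced by a bottom-up dynamic program: a slice-based prefix-sum array plus one dp row per student count, so each (books,students) state is computed once, and the student loop is capped at min(k,n) since more students than books cannot help.
-- outside the precondition, e.g. on minpages([], 2, 2): A returns 0, B returns 0; on minpages([5, 2, 4], 3, 0): A returns 5, B returns 6
import Mathlib
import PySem

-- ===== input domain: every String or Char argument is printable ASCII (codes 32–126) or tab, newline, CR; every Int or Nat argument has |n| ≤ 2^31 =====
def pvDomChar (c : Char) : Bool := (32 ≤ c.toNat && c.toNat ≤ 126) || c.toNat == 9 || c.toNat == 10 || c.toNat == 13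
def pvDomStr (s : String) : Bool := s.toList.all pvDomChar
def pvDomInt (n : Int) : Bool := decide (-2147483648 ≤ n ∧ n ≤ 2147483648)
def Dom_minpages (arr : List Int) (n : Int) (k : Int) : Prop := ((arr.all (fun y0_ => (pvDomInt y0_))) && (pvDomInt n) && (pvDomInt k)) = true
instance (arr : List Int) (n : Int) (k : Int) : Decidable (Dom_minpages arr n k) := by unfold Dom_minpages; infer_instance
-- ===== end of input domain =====

-- B replaces A's exponential recursion by a bottom-up row-by-row DP over (books, students)
-- with prefix sums, computing each state once (objective: alternative algorithm; the timing
-- run did not confirm a measurable speed-up at scale). Equality of RETURN values is proved.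

-- ===== PORT A =====
-- literal port of A; 'res' starts as float('inf'), modelled as 'none' (the loop always runs
-- under Pre_, so the float never escapes); arr[0] on empty arr raises in Python (excluded by Pre_)
def minpages (arr : List Int) (n : Int) (k : Int) : Int :=
  if k = 1 then (PySem.List.slice arr (some 0) (some n)).sum
  else if n = 1 then PySem.List.pyGetD arr 0 0
  else
    ((PySem.List.pyRange 1 n 1).attach.foldl
      (fun res i =>
        let c := max (minpages arr i.1 (k - 1)) ((PySem.List.slice arr (some i.1) (some n)).sum)
        match res with
        | none => some c
        | some r => some (min r c))
      none).getD 0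
termination_by n.toNat
decreasing_by
  have h := PySem.List.mem_pyRange_one.mp i.2
  omega

-- ===== PORT B =====
def minpages_alt (arr : List Int) (n : Int) (k : Int) : Int :=
  if k = 1 then (PySem.List.slice arr (some 0) (some n)).sum
  else if n = 1 then PySem.List.pyGetD arr 0 0
  else
    let pref := (PySem.List.pyRange 0 (n+1) 1).map
        (fun m => (PySem.List.slice arr none (some m)).sum)
    let dp0 := PySem.List.slice pref (some 1) none
    let dp := (PySem.List.pyRange 3 (min k n + 1) 1).foldl
        (fun dp _ =>
          [PySem.List.pyGetD dp 0 0] ++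
          (PySem.List.pyRange 2 (n+1) 1).map (fun m =>
            (PySem.List.min?
              ((PySem.List.pyRange 1 m 1).map (fun i =>
                max (PySem.List.pyGetD dp (i-1) 0)
                    (PySem.List.pyGetD pref m 0 - PySem.List.pyGetD pref i 0)))
              (fun x => x)).getD 0))
        dp0
    (PySem.List.min?
      ((PySem.List.pyRange 1 n 1).map (fun i =>
        max (PySem.List.pyGetD dp (i-1) 0)
            (PySem.List.pyGetD pref n 0 - PySem.List.pyGetD pref i 0)))
      (fun x => x)).getD 0

-- ===== PRECONDITION & SPEC =====
-- Pre_ excludes (beyond the k=1 and n=1 shortcut branches, which are kept for every input):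
-- n < 1 with k ≠ 1 (A returns float('inf'), not an int); empty arr with n ≥ 2 (A's recursion
-- reaches arr[0] and raises IndexError, except the accidental all-zero k=2 case); n = 1 with
-- empty arr (A raises); and k < 1, where 'allocate among k students' is undefined and neither
-- value is specified: A returns a split that uses phantom students, B the one-student total.
def Pre_minpages (arr : List Int) (n : Int) (k : Int) : Prop :=
  k = 1 ∨ (n = 1 ∧ arr ≠ []) ∨ (2 ≤ n ∧ arr ≠ [] ∧ 1 ≤ k)
instance (arr : List Int) (n : Int) (k : Int) : Decidable (Pre_minpages arr n k) := by
  unfold Pre_minpages; infer_instance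
def pvWitness_minpages : List Int × Int × Int := ([12, 34, 67, 90, 25, 41], 4, 2)
def Spec_minpages (arr : List Int) (n : Int) (k : Int) (out : Int) : Prop := out = minpages_alt arr n k
instance (arr : List Int) (n : Int) (k : Int) (out : Int) : Decidable (Spec_minpages arr n k out) := by unfold Spec_minpages; infer_instance

-- ===== CLAIM (what is proved, stated in full; the proofs are below) =====
def Claim_equal_minpages : Prop := ∀ (arr : List Int) (n : Int) (k : Int), Dom_minpages arr n k → Pre_minpages arr n k → Spec_minpages arr n k (minpages arr n k)

-- ===== LEMMAS AND PROOFS =====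

-- partial sums of the first m books
def pvS (arr : List Int) (m : Nat) : Int := (arr.take m).sum

-- the shared mathematical recurrence: pvG arr m s = best max-block-sum splitting the first m
-- books among s students, exactly as A's recursion computes it
def pvG (arr : List Int) : Nat → Nat → Int
  | _, 0 => 0
  | m, 1 => pvS arr m
  | 0, _+2 => 0
  | 1, _+2 => arr.headD 0
  | m+2, s+2 =>
    ((PySem.List.min?
      ((List.range (m+1)).map (fun j =>
        max (pvG arr (j+1) (s+1)) (pvS arr (m+2) - pvS arr (j+1))))
      (fun x => x)).getD 0)
termination_by _m s => s

theorem pv_sliceSum (arr : List Int) (a b : Nat) (hab : a ≤ b) :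
    (PySem.List.slice arr (some (a : Int)) (some (b : Int))).sum = pvS arr b - pvS arr a := by
  rw [PySem.List.slice_natCast]
  have h : arr.take b = arr.take a ++ (arr.drop a).take (b - a) := by
    rw [← List.take_add, Nat.add_sub_cancel' hab]
  unfold pvS
  rw [h, List.sum_append]
  ring

theorem pv_foldlOptMin_aux (t : List Int) (a : Int) :
    t.foldl (fun res c => match res with | none => some c | some r => some (min r c)) (some a)
      = some (t.foldl min a) := by
  induction t generalizing a with
  | nil => rfl
  | cons x xs ih => simp only [List.foldl]; rw [ih]

theorem pv_foldlOptMin (l : List Int) :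
    l.foldl (fun res c => match res with | none => some c | some r => some (min r c)) none
      = PySem.List.min? l (fun x => x) := by
  cases l with
  | nil => simp [PySem.List.min?]
  | cons x t =>
    rw [PySem.List.min?_id_cons]
    simpa using pv_foldlOptMin_aux t x

theorem pv_A_eq_G (arr : List Int) (m s : Nat) (h1 : 1 ≤ m) (h3 : 1 ≤ s) :
    minpages arr (m : Int) (s : Int) = pvG arr m s := by
  induction m using Nat.strong_induction_on generalizing s with
  | _ m IH =>
    match s, h3 with
    | 1, _ =>
      rw [minpages, if_pos (show ((1:Nat):Int) = 1 by norm_num)]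
      have hs := pv_sliceSum arr 0 m (Nat.zero_le m)
      simp only [Nat.cast_zero] at hs
      rw [hs]
      match m, h1 with
      | (mm+1), _ => simp [pvG, pvS]
    | (u+2), _ =>
      match m, h1 with
      | 1, _ =>
        rw [minpages, if_neg (by omega), if_pos (show ((1:Nat):Int) = 1 by norm_num)]
        cases arr with
        | nil => simp [pvG, PySem.List.pyGetD, PySem.List.pyGet?, PySem.List.pyIdx?]
        | cons x xs => simp [pvG, PySem.List.pyGetD, PySem.List.pyGet?, PySem.List.pyIdx?]
      | (mm+2), _ =>
        rw [minpages, if_neg (by omega), if_neg (by omega)]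
        have h1 : (List.foldl
            (fun res i =>
              let c := max (minpages arr (i.1) (((u+2:Nat):Int) - 1))
                ((PySem.List.slice arr (some i.1) (some ((mm+2:Nat):Int))).sum)
              match res with | none => some c | some r => some (min r c))
            none (PySem.List.pyRange 1 ((mm+2:Nat):Int) 1).attach)
            = (List.foldl
            (fun res v =>
              match res with
              | none => some (max (minpages arr v (((u+2:Nat):Int) - 1))
                  ((PySem.List.slice arr (some v) (some ((mm+2:Nat):Int))).sum))
              | some r => some (min r (max (minpages arr v (((u+2:Nat):Int) - 1))
                  ((PySem.List.slice arr (some v) (some ((mm+2:Nat):Int))).sum))))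
            none (PySem.List.pyRange 1 ((mm+2:Nat):Int) 1)) :=
          List.foldl_attach (f := fun res v =>
              match res with
              | none => some (max (minpages arr v (((u+2:Nat):Int) - 1))
                  ((PySem.List.slice arr (some v) (some ((mm+2:Nat):Int))).sum))
              | some r => some (min r (max (minpages arr v (((u+2:Nat):Int) - 1))
                  ((PySem.List.slice arr (some v) (some ((mm+2:Nat):Int))).sum)))) ..
        rw [h1]
        have h2 : (List.foldl
            (fun res c' => match res with | none => some c' | some r => some (min r c'))
            none ((PySem.List.pyRange 1 ((mm+2:Nat):Int) 1).map (fun v =>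
              max (minpages arr v (((u+2:Nat):Int) - 1))
                ((PySem.List.slice arr (some v) (some ((mm+2:Nat):Int))).sum))))
            = (List.foldl
            (fun res v =>
              match res with
              | none => some (max (minpages arr v (((u+2:Nat):Int) - 1))
                  ((PySem.List.slice arr (some v) (some ((mm+2:Nat):Int))).sum))
              | some r => some (min r (max (minpages arr v (((u+2:Nat):Int) - 1))
                  ((PySem.List.slice arr (some v) (some ((mm+2:Nat):Int))).sum))))
            none (PySem.List.pyRange 1 ((mm+2:Nat):Int) 1)) := List.foldl_map
        rw [← h2, pv_foldlOptMin]
        have hrange : PySem.List.pyRange 1 ((mm+2 : Nat) : Int) 1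
            = (List.range (mm+1)).map (fun j : Nat => (1 : Int) + (j : Int)) := by
          have e : (((mm+2:Nat):Int) - 1).toNat = mm + 1 := by omega
          rw [PySem.List.pyRange_one, e]
        rw [hrange, List.map_map]
        have hlist : ((List.range (mm+1)).map ((fun v =>
              max (minpages arr v ((((u+2:Nat)) : Int) - 1))
                ((PySem.List.slice arr (some v) (some ((mm+2:Nat) : Int))).sum)) ∘ (fun j : Nat => (1:Int) + (j : Int))))
            = (List.range (mm+1)).map (fun j =>
              max (pvG arr (j+1) (u+1)) (pvS arr (mm+2) - pvS arr (j+1))) := by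
          apply List.map_congr_left
          intro j hj
          rw [List.mem_range] at hj
          simp only [Function.comp]
          have e1 : (1 : Int) + (j : Int) = ((j+1 : Nat) : Int) := by push_cast; ring
          have e2 : (((u+2:Nat)) : Int) - 1 = ((u+1 : Nat) : Int) := by push_cast; ring
          rw [e1, e2, IH (j+1) (by omega) (u+1) (by omega) (by omega),
              pv_sliceSum arr (j+1) (mm+2) (by omega)]
        rw [hlist]
        simp [pvG]

theorem pvG_head (arr : List Int) (s : Nat) (hs : 1 ≤ s) :
    pvG arr 1 s = arr.headD 0 := by
  match s, hs with
  | 1, _ =>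
    cases arr with
    | nil => simp [pvG, pvS]
    | cons x xs => simp [pvG, pvS]
  | (v+2), _ => simp [pvG]

theorem pv_G_const (arr : List Int) (m s t : Nat) (h1 : 1 ≤ m)
    (hs : m ≤ s) (ht : m ≤ t) : pvG arr m s = pvG arr m t := by
  induction m using Nat.strong_induction_on generalizing s t with
  | _ m IH =>
    match m, h1, hs, ht with
    | 1, _, hs, ht =>
      rw [pvG_head arr s hs, pvG_head arr t ht]
    | (c+2), _, hs, ht =>
      match s, t, hs, ht with
      | (a+2), (b+2), hs, ht =>
        simp only [pvG]
        congr 2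
        apply List.map_congr_left
        intro j hj
        rw [List.mem_range] at hj
        rw [IH (j+1) (by omega) (a+1) (b+1) (by omega) (by omega) (by omega)]

theorem pv_getD_map_range (f : Nat → Int) (N t : Nat) (h : t < N) :
    PySem.List.pyGetD ((List.range N).map f) ((t : Nat) : Int) 0 = f t := by
  rw [PySem.List.pyGetD_natCast]
  simp [List.getD, h]

theorem pvG_one (arr : List Int) (m : Nat) : pvG arr m 1 = pvS arr m := by
  match m with
  | 0 => simp [pvG]
  | 1 => simp [pvG]
  | m+2 => simp [pvG]



theorem pv_pref_eq (arr : List Int) (N : Nat) :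
    (PySem.List.pyRange 0 ((N : Int)+1) 1).map
      (fun m => (PySem.List.slice arr none (some m)).sum)
    = (List.range (N+1)).map (fun t => pvS arr t) := by
  have e : (((N : Int)+1) - 0).toNat = N+1 := by omega
  rw [PySem.List.pyRange_one, e, List.map_map]
  apply List.map_congr_left
  intro t ht
  rw [List.mem_range] at ht
  simp only [Function.comp]
  have e1 : (0 : Int) + (t : Int) = ((t : Nat) : Int) := by omega
  rw [e1, PySem.List.slice_to_natCast]
  rfl

-- one dp entry of the next student row, computed from the previous row
theorem pv_entry (arr : List Int) (M v j : Nat) (hj : j ≤ M) :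
    (PySem.List.min?
      ((PySem.List.pyRange 1 ((2 : Int) + (j : Int)) 1).map (fun i =>
        max (PySem.List.pyGetD ((List.range (M+2)).map (fun j' => pvG arr (j'+1) (v+1))) (i-1) 0)
            (PySem.List.pyGetD ((List.range (M+2+1)).map (fun t => pvS arr t)) ((2 : Int) + (j : Int)) 0
             - PySem.List.pyGetD ((List.range (M+2+1)).map (fun t => pvS arr t)) i 0)))
      (fun x => x)).getD 0
    = pvG arr (j+2) (v+2) := by
  have hrange1 : PySem.List.pyRange 1 ((2 : Int) + (j : Int)) 1
      = (List.range (j+1)).map (fun t : Nat => (1 : Int) + (t : Int)) := by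
    have e : (((2 : Int) + (j : Int)) - 1).toNat = j+1 := by omega
    rw [PySem.List.pyRange_one, e]
  rw [hrange1, List.map_map]
  have hinner : ((List.range (j+1)).map ((fun i =>
        max (PySem.List.pyGetD ((List.range (M+2)).map (fun j' => pvG arr (j'+1) (v+1))) (i-1) 0)
            (PySem.List.pyGetD ((List.range (M+2+1)).map (fun t => pvS arr t)) ((2 : Int) + (j : Int)) 0
             - PySem.List.pyGetD ((List.range (M+2+1)).map (fun t => pvS arr t)) i 0)) ∘ (fun t : Nat => (1 : Int) + (t : Int))))
      = (List.range (j+1)).map (fun t =>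
          max (pvG arr (t+1) (v+1)) (pvS arr (j+2) - pvS arr (t+1))) := by
    apply List.map_congr_left
    intro t ht
    rw [List.mem_range] at ht
    simp only [Function.comp]
    have e1 : ((1 : Int) + (t : Int)) - 1 = ((t : Nat) : Int) := by omega
    have e2 : (2 : Int) + (j : Int) = (((j+2 : Nat)) : Int) := by push_cast; ring
    have e3 : (1 : Int) + (t : Int) = (((t+1 : Nat)) : Int) := by omega
    rw [e1, pv_getD_map_range _ _ t (by omega)]
    rw [e2, pv_getD_map_range _ _ (j+2) (by omega)]
    rw [e3, pv_getD_map_range _ _ (t+1) (by omega)]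
  rw [hinner]
  simp [pvG]

-- one pass of B's inner loop body turns the dp row for s students into the row for s+1
theorem pv_row_step (arr : List Int) (M v : Nat) :
    ([PySem.List.pyGetD ((List.range (M+2)).map (fun j => pvG arr (j+1) (v+1))) 0 0] ++
      (PySem.List.pyRange 2 (((M+2 : Nat) : Int)+1) 1).map (fun m =>
        (PySem.List.min?
          ((PySem.List.pyRange 1 m 1).map (fun i =>
            max (PySem.List.pyGetD ((List.range (M+2)).map (fun j => pvG arr (j+1) (v+1))) (i-1) 0)
                (PySem.List.pyGetD ((List.range (M+2+1)).map (fun t => pvS arr t)) m 0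
                 - PySem.List.pyGetD ((List.range (M+2+1)).map (fun t => pvS arr t)) i 0)))
          (fun x => x)).getD 0))
    = (List.range (M+2)).map (fun j => pvG arr (j+1) (v+2)) := by
  have hhead : PySem.List.pyGetD ((List.range (M+2)).map (fun j => pvG arr (j+1) (v+1))) 0 0
      = pvG arr 1 (v+2) := by
    have h00 := pv_getD_map_range (fun j => pvG arr (j+1) (v+1)) (M+2) 0 (by omega)
    simp only [Nat.cast_zero, Nat.zero_add] at h00
    rw [h00, pvG_head arr (v+1) (by omega), pvG_head arr (v+2) (by omega)]
  have hrange2 : PySem.List.pyRange 2 (((M+2 : Nat) : Int)+1) 1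
      = (List.range (M+1)).map (fun j : Nat => (2 : Int) + (j : Int)) := by
    have e : ((((M+2 : Nat) : Int)+1) - 2).toNat = M+1 := by omega
    rw [PySem.List.pyRange_one, e]
  rw [hhead, hrange2, List.map_map]
  have hmap : ((List.range (M+1)).map ((fun m =>
        (PySem.List.min?
          ((PySem.List.pyRange 1 m 1).map (fun i =>
            max (PySem.List.pyGetD ((List.range (M+2)).map (fun j => pvG arr (j+1) (v+1))) (i-1) 0)
                (PySem.List.pyGetD ((List.range (M+2+1)).map (fun t => pvS arr t)) m 0
                 - PySem.List.pyGetD ((List.range (M+2+1)).map (fun t => pvS arr t)) i 0)))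
          (fun x => x)).getD 0) ∘ (fun j : Nat => (2 : Int) + (j : Int))))
      = (List.range (M+1)).map (fun j => pvG arr (j+2) (v+2)) := by
    apply List.map_congr_left
    intro j hj
    rw [List.mem_range] at hj
    simp only [Function.comp]
    exact pv_entry arr M v j (by omega)
  rw [hmap]
  have : List.range (M+2) = 0 :: (List.range (M+1)).map Nat.succ := List.range_succ_eq_map
  rw [this]
  simp [List.map_map, Function.comp]

-- B's outer loop: folding the body T times over the row for s students gives the row for s+T
theorem pv_loop (arr : List Int) (M : Nat) (l : List Int) :
    ∀ (v : Nat),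
    l.foldl (fun dp _ =>
        [PySem.List.pyGetD dp 0 0] ++
        (PySem.List.pyRange 2 (((M+2 : Nat) : Int)+1) 1).map (fun m =>
          (PySem.List.min?
            ((PySem.List.pyRange 1 m 1).map (fun i =>
              max (PySem.List.pyGetD dp (i-1) 0)
                  (PySem.List.pyGetD ((List.range (M+2+1)).map (fun t => pvS arr t)) m 0
                   - PySem.List.pyGetD ((List.range (M+2+1)).map (fun t => pvS arr t)) i 0)))
            (fun x => x)).getD 0))
      ((List.range (M+2)).map (fun j => pvG arr (j+1) (v+1)))
    = (List.range (M+2)).map (fun j => pvG arr (j+1) (v+1+l.length)) := by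
  induction l with
  | nil => simp
  | cons x xs IH =>
    intro v
    simp only [List.foldl]
    rw [pv_row_step arr M v, IH (v+1)]
    have e : v + 1 + 1 + xs.length = v + 1 + (x :: xs).length := by simp; omega
    rw [e]

theorem pv_B_eq_G (arr : List Int) (n k : Int) (h1 : 2 ≤ n) (h3 : 2 ≤ k) :
    minpages_alt arr n k = pvG arr n.toNat (min k n).toNat := by
  obtain ⟨N, rfl⟩ : ∃ N : Nat, n = ((N : Nat) : Int) :=
    ⟨n.toNat, (Int.toNat_of_nonneg (by omega)).symm⟩
  obtain ⟨M, rfl⟩ : ∃ M : Nat, N = M+2 := ⟨N-2, by omega⟩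
  obtain ⟨K0, rfl⟩ : ∃ K0 : Nat, k = ((K0 : Nat) : Int) :=
    ⟨k.toNat, (Int.toNat_of_nonneg (by omega)).symm⟩
  rw [minpages_alt, if_neg (by omega), if_neg (by omega)]
  simp only []
  rw [pv_pref_eq arr (M+2)]
  have hdp0 : PySem.List.slice ((List.range (M+2+1)).map (fun t => pvS arr t)) (some 1) none
      = (List.range (M+2)).map (fun j => pvG arr (j+1) (0+1)) := by
    rw [PySem.List.slice_from _ (by norm_num), List.range_succ_eq_map]
    simp [List.map_map, Function.comp, pvG_one]
  rw [hdp0, pv_loop arr M (PySem.List.pyRange 3 (min ((K0:Nat):Int) (((M+2:Nat)):Int) + 1) 1) 0]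
  have hlen2 : (PySem.List.pyRange 3 (min ((K0:Nat):Int) (((M+2:Nat)):Int) + 1) 1).length
      = min K0 (M+2) - 2 := by
    rw [PySem.List.length_pyRange_one]
    omega
  rw [hlen2]
  have e : 0 + 1 + (min K0 (M+2) - 2) = (min K0 (M+2) - 2) + 1 := by omega
  rw [e]
  have e2 : (((M+2:Nat)):Int) = (2 : Int) + ((M : Nat) : Int) := by push_cast; ring
  rw [e2, pv_entry arr M (min K0 (M+2) - 2) M (by omega)]
  have g1 : ((2 : Int) + ((M : Nat) : Int)).toNat = M + 2 := by omega
  have g2 : (min ((K0:Nat):Int) ((2 : Int) + ((M : Nat) : Int))).toNat = min K0 (M+2) := by omega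
  rw [g1, g2]
  congr 1
  omega

-- ===== VERDICT (by name: the statement is the Claim_ definition above) =====
theorem minpages_spec : Claim_equal_minpages := by
  intro arr n k _ hpre
  unfold Spec_minpages
  by_cases hk1 : k = 1
  · simp [minpages, minpages_alt, hk1]
  by_cases hn1 : n = 1
  · simp [minpages, minpages_alt, hk1, hn1]
  obtain ⟨hn2, harr, hk⟩ : 2 ≤ n ∧ arr ≠ [] ∧ 1 ≤ k := by
    rcases hpre with h | h | h
    · exact absurd h hk1
    · exact absurd h.1 hn1
    · exact h
  have hk2 : 2 ≤ k := by omega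
  have hA : minpages arr n k = pvG arr n.toNat k.toNat := by
    have := pv_A_eq_G arr n.toNat k.toNat (by omega) (by omega)
    simpa [Int.toNat_of_nonneg (by omega : (0:Int) ≤ n),
           Int.toNat_of_nonneg (by omega : (0:Int) ≤ k)] using this
  have hB := pv_B_eq_G arr n k hn2 hk2
  rw [hA, hB]
  by_cases hnk : n ≤ k
  · have hmin : min k n = n := by omega
    rw [hmin]
    exact pv_G_const arr n.toNat k.toNat n.toNat (by omega) (by omega) (by omega)
  · have hmin : min k n = k := by omega
    rw [hmin]
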